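-- pv_equiv track=rewrite | github.com/synthaicode/XRefKit | fm/skillrun.py | _overall_workitem_status
-- ===== SOURCE A (Python) =====
-- ACCEPTED_CLOSE_STATUSES = {"done", "escalated"}
--
-- def _overall_workitem_status(items: list[dict[str, str]]) -> str:
--     if not items:
--         return "pending"
--     if all(item["status"] in ACCEPTED_CLOSE_STATUSES for item in items):
--         if any(item["status"] == "escalated" for item in items):
--             return "escalated"
--         return "done"
--     if any(item["status"] in {"blocked", "unknown", "escalated"} for item in items):
--         return "blocked"
--     return "in_progress"
-- ===== SOURCE B (Python) =====
-- # Lattice fold: each status maps to an element of a small join-semilattice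
-- # (done < escalated < blocked, done < in_progress < blocked,
-- #  join(escalated, in_progress) = blocked); the overall status is the join
-- # of all items' elements, computed in one fold, "pending" for the empty list.
-- _CAT = {"done": "done", "escalated": "escalated",
--         "blocked": "blocked", "unknown": "blocked"}
--
--
-- def _join(a, b):
--     if a == b:
--         return a
--     if a == "blocked" or b == "blocked":
--         return "blocked"
--     if a == "done":
--         return b
--     if b == "done":
--         return a
--     return "blocked"  # escalated vs in_progress
--
--
-- def _overall_workitem_status(items: list[dict[str, str]]) -> str:
--     result = "pending"
--     for item in items:
--         c = _CAT.get(item["status"], "in_progress")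
--         result = c if result == "pending" else _join(result, c)
--     return result
-- ===== Notes on version B (the rewrite author's own statement) =====
-- stated objective: alternative
-- what changed: Replaces A's staged all/any list scans and early-return branch cascade with a single fold over a five-element join-semilattice: each status is mapped to a lattice element and the overall status is the associative join of all of them.
-- outside the precondition, e.g. on _overall_workitem_status([{'status': 'blocked'}, {}]): A returns 'blocked', B raises KeyError
import Mathlib
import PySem

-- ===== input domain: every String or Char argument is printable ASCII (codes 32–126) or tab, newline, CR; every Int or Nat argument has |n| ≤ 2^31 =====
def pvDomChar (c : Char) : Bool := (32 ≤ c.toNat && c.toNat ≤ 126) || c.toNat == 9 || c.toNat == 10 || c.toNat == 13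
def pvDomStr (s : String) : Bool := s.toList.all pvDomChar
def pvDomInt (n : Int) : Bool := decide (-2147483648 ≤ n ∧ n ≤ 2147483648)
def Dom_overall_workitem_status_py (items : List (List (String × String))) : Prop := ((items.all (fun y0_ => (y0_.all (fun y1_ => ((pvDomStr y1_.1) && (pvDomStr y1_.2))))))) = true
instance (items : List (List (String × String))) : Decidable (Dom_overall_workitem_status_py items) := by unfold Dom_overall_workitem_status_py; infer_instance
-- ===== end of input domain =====

-- B replaces A's staged all/any scans with one fold of a join-semilattice over the items (objective: alternative).

-- ===== PORT A =====
-- item["status"] (first match in the association list; Pre_ guarantees the key is present)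
def pvStatus (item : List (String × String)) : String :=
  PySem.Dict.getD (PySem.Dict.mk item) "status" ""

def overall_workitem_status_py (items : List (List (String × String))) : String :=
  if items.isEmpty then "pending"
  else if items.all (fun it => pvStatus it == "done" || pvStatus it == "escalated") then
    (if items.any (fun it => pvStatus it == "escalated") then "escalated" else "done")
  else if items.any (fun it =>
      pvStatus it == "blocked" || pvStatus it == "unknown" || pvStatus it == "escalated") then
    "blocked"
  else "in_progress"

-- ===== PORT B =====
-- the _CAT dict of Source B
def pvCatD : PySem.Dict String String :=
  PySem.Dict.mk [("done", "done"), ("escalated", "escalated"),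
                 ("blocked", "blocked"), ("unknown", "blocked")]

-- _join of Source B
def pvJoin (a b : String) : String :=
  if a == b then a
  else if a == "blocked" || b == "blocked" then "blocked"
  else if a == "done" then b
  else if b == "done" then a
  else "blocked"

-- one iteration of Source B's loop
def pvStep (r : String) (item : List (String × String)) : String :=
  let c := PySem.Dict.getD pvCatD (pvStatus item) "in_progress"
  if r == "pending" then c else pvJoin r c

def overall_workitem_status_py_alt (items : List (List (String × String))) : String :=
  items.foldl pvStep "pending"

-- ===== PRECONDITION & SPEC =====
-- Pre_ excludes inputs where some item lacks a "status" key: there B raises KeyError, and A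
-- either raises KeyError too or (when an earlier item already short-circuits one of its scans)
-- returns a value B cannot.
def Pre_overall_workitem_status_py (items : List (List (String × String))) : Prop :=
  (items.all (fun it => it.any (fun p => p.1 == "status"))) = true
instance (items : List (List (String × String))) : Decidable (Pre_overall_workitem_status_py items) := by
  unfold Pre_overall_workitem_status_py; infer_instance

def pvWitness_overall_workitem_status_py : (List (List (String × String))) := [[("status", "done")]]

def Spec_overall_workitem_status_py (items : List (List (String × String))) (out : String) : Prop := out = overall_workitem_status_py_alt items
instance (items : List (List (String × String))) (out : String) : Decidable (Spec_overall_workitem_status_py items out) := by unfold Spec_overall_workitem_status_py; infer_instance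

-- ===== CLAIM (what is proved, stated in full; the proofs are below) =====
def Claim_equal_overall_workitem_status_py : Prop := ∀ (items : List (List (String × String))), Dom_overall_workitem_status_py items → Pre_overall_workitem_status_py items → Spec_overall_workitem_status_py items (overall_workitem_status_py items)

-- ===== LEMMAS AND PROOFS =====

-- abstract five-point join-semilattice used only in the proofs
inductive PvSt : Type
  | pending | done | esc | blocked | inprog
deriving DecidableEq, Repr

def pvToStr : PvSt → String
  | .pending => "pending"
  | .done => "done"
  | .esc => "escalated"
  | .blocked => "blocked"
  | .inprog => "in_progress"

def pvCatE (s : String) : PvSt :=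
  if s = "done" then .done
  else if s = "escalated" then .esc
  else if s = "blocked" then .blocked
  else if s = "unknown" then .blocked
  else .inprog

def pvStepE (a c : PvSt) : PvSt :=
  match a with
  | .pending => c
  | .blocked => .blocked
  | .done => c
  | .esc => match c with
            | .done => .esc | .esc => .esc | .pending => .esc
            | _ => .blocked
  | .inprog => match c with
               | .done => .inprog | .inprog => .inprog | .pending => .inprog
               | _ => .blocked

lemma pvCatE_ne_pending (s : String) : pvCatE s ≠ .pending := by
  unfold pvCatE; split_ifs <;> simp

lemma pvCatE_cases (s : String) :
    pvCatE s = .done ∨ pvCatE s = .esc ∨ pvCatE s = .blocked ∨ pvCatE s = .inprog := by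
  unfold pvCatE; split_ifs <;> simp

lemma pvStepE_ne_pending (a c : PvSt) (ha : a ≠ .pending) (hc : c ≠ .pending) :
    pvStepE a c ≠ .pending := by
  cases a <;> cases c <;> simp_all [pvStepE]

lemma catD_eval (s : String) :
    PySem.Dict.getD pvCatD s "in_progress" = pvToStr (pvCatE s) := by
  unfold pvCatE
  simp only [pvCatD, PySem.Dict.getD, PySem.Dict.get?_mk_cons]
  split_ifs <;> simp_all [beq_iff_eq, Option.getD, PySem.Dict.get?, pvToStr]

lemma pvStep_abs (a : PvSt) (it : List (String × String)) :
    pvStep (pvToStr a) it = pvToStr (pvStepE a (pvCatE (pvStatus it))) := by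
  unfold pvStep
  rw [catD_eval]
  cases h : pvCatE (pvStatus it) <;> cases a <;>
    first | (exact absurd h (pvCatE_ne_pending _)) | rfl

lemma fold_abs (xs : List (List (String × String))) (a : PvSt) :
    xs.foldl pvStep (pvToStr a)
      = pvToStr (xs.foldl (fun t it => pvStepE t (pvCatE (pvStatus it))) a) := by
  induction xs generalizing a with
  | nil => rfl
  | cons it xs ih => rw [List.foldl_cons, pvStep_abs, ih, List.foldl_cons]

lemma any_or {α : Type} (l : List α) (p q : α → Bool) :
    l.any (fun x => p x || q x) = (l.any p || l.any q) := by
  induction l with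
  | nil => rfl
  | cons x l ih => cases hp : p x <;> cases hq : q x <;> simp_all

lemma all_nn {α : Type} (l : List α) (p q : α → Bool) :
    l.all (fun x => !p x && !q x) = (!(l.any p) && !(l.any q)) := by
  induction l with
  | nil => rfl
  | cons x l ih => cases hp : p x <;> cases hq : q x <;> simp_all

lemma foldE_char (xs : List (List (String × String))) (a : PvSt) (ha : a ≠ .pending) :
    xs.foldl (fun t it => pvStepE t (pvCatE (pvStatus it))) a
      = (if (a == .blocked || xs.any (fun it => pvCatE (pvStatus it) == PvSt.blocked))
            || ((a == .esc || xs.any (fun it => pvCatE (pvStatus it) == PvSt.esc))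
                && (a == .inprog || xs.any (fun it => pvCatE (pvStatus it) == PvSt.inprog)))
         then .blocked
         else if a == .inprog || xs.any (fun it => pvCatE (pvStatus it) == PvSt.inprog) then .inprog
         else if a == .esc || xs.any (fun it => pvCatE (pvStatus it) == PvSt.esc) then .esc
         else .done) := by
  induction xs generalizing a with
  | nil => cases a <;> first | exact absurd rfl ha | rfl
  | cons it xs ih =>
    rw [List.foldl_cons, ih _ (pvStepE_ne_pending a _ ha (pvCatE_ne_pending _))]
    simp only [List.any_cons]
    rcases pvCatE_cases (pvStatus it) with h|h|h|h <;> simp only [h] <;> cases a <;>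
      first
        | exact absurd rfl ha
        | (simp only [pvStepE]
           cases hb : xs.any (fun it => pvCatE (pvStatus it) == PvSt.blocked) <;>
           cases he : xs.any (fun it => pvCatE (pvStatus it) == PvSt.esc) <;>
           cases hi : xs.any (fun it => pvCatE (pvStatus it) == PvSt.inprog) <;>
           simp [hb, he, hi])

lemma acc_iff (s : String) :
    (s == "done" || s == "escalated") = (!(pvCatE s == .blocked) && !(pvCatE s == .inprog)) := by
  unfold pvCatE
  split_ifs <;> subst_vars <;> first | decide | (rw [Bool.eq_iff_iff]; simp [*])
lemma esc_iff (s : String) : (s == "escalated") = (pvCatE s == .esc) := by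
  unfold pvCatE
  split_ifs <;> subst_vars <;> first | decide | (rw [Bool.eq_iff_iff]; simp [*])
lemma tri_iff (s : String) :
    (s == "blocked" || s == "unknown" || s == "escalated")
      = (pvCatE s == .blocked || pvCatE s == .esc) := by
  unfold pvCatE
  split_ifs <;> subst_vars <;> first | decide | (rw [Bool.eq_iff_iff]; simp [*])

-- ===== VERDICT (by name: the statement is the Claim_ definition above) =====
theorem overall_workitem_status_py_spec : Claim_equal_overall_workitem_status_py := by
  intro items _ _
  unfold Spec_overall_workitem_status_py overall_workitem_status_py overall_workitem_status_py_alt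
  cases items with
  | nil => rfl
  | cons x xs =>
    rw [List.foldl_cons, show pvStep "pending" x = pvToStr (pvCatE (pvStatus x)) from
          pvStep_abs PvSt.pending x,
        fold_abs, foldE_char xs _ (pvCatE_ne_pending _)]
    simp only [List.isEmpty_cons, List.all_cons, List.any_cons]
    simp only [tri_iff]
    simp only [acc_iff]
    simp only [esc_iff]
    simp only [any_or, all_nn]
    rcases pvCatE_cases (pvStatus x) with h|h|h|h <;> simp only [h] <;>
      (cases hb : xs.any (fun it => pvCatE (pvStatus it) == PvSt.blocked) <;>
       cases he : xs.any (fun it => pvCatE (pvStatus it) == PvSt.esc) <;>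
       cases hi : xs.any (fun it => pvCatE (pvStatus it) == PvSt.inprog) <;>
       simp [h, hb, he, hi, pvToStr])
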